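-- pv_equiv track=rewrite | github.com/dimasterpodkaster/analyse_logs_task | reports/handlers.py | generate
-- ===== SOURCE A (Python) =====
-- from typing import Dict, List
-- from collections import defaultdict
--
-- LOG_LEVELS = ["DEBUG", "INFO", "WARNING", "ERROR", "CRITICAL"]
--
-- def generate(data_list: List[Dict[str, Dict[str, int]]]) -> str:
--     combined = defaultdict(lambda: defaultdict(int))
--     total_requests = 0
--
--     for data in data_list:
--         for handler, level_counts in data.items():
--             for level in LOG_LEVELS:
--                 combined[handler][level] += level_counts.get(level, 0)
--                 total_requests += level_counts.get(level, 0)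
--
--     output = [f"\nTotal requests: {total_requests}\n"]
--     header = f"{'HANDLER':<24}" + "".join(f"{lvl:<8}" for lvl in LOG_LEVELS)
--     output.append(header)
--
--     for handler in sorted(combined.keys()):
--         row = f"{handler:<24}"
--         for level in LOG_LEVELS:
--             row += f"{combined[handler][level]:<8}"
--         output.append(row)
--
--     footer = " " * 24
--     for level in LOG_LEVELS:
--         level_sum = sum(combined[handler][level] for handler in combined)
--         footer += f"{level_sum:<8}"
--     output.append(footer)
--
--     return "\n".join(output)
-- ===== SOURCE B (Python) =====
-- # B: sort-then-scan instead of hash accumulation — flatten the (handler, counts) pairs,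
-- # take column totals in one pass, then SORT the pairs by handler and emit each row from
-- # one contiguous run of the sorted list; no dict/table is ever built.
-- LOG_LEVELS = ["DEBUG", "INFO", "WARNING", "ERROR", "CRITICAL"]
--
-- def generate(data_list):
--     flat = [item for data in data_list for item in data.items()]
--     totals = [sum(lc.get(level, 0) for _, lc in flat) for level in LOG_LEVELS]
--     total = sum(totals)
--     pairs = sorted(flat, key=lambda p: p[0])
--
--     lines = ["\nTotal requests: %d\n" % total,
--              "HANDLER".ljust(24) + "".join(l.ljust(8) for l in LOG_LEVELS)]
--     i, n = 0, len(pairs)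
--     while i < n:
--         h = pairs[i][0]
--         j = i
--         while j < n and pairs[j][0] == h:
--             j += 1
--         group = [lc for _, lc in pairs[i:j]]
--         lines.append(h.ljust(24) + "".join(
--             str(sum(lc.get(level, 0) for lc in group)).ljust(8) for level in LOG_LEVELS))
--         i = j
--     lines.append(" " * 24 + "".join(str(t).ljust(8) for t in totals))
--     return "\n".join(lines)
-- ===== Notes on version B (the rewrite author's own statement) =====
-- stated objective: alternative
-- what changed: B never builds A's nested defaultdict accumulator: it flattens the (handler, level_counts) pairs, takes the column totals in one pass, then SORTS the flat pair list by handler and emits each report row from one contiguous run of the sorted list (sort-then-scan group-by instead of hash-table accumulation plus a footer rescan).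
import Mathlib
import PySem

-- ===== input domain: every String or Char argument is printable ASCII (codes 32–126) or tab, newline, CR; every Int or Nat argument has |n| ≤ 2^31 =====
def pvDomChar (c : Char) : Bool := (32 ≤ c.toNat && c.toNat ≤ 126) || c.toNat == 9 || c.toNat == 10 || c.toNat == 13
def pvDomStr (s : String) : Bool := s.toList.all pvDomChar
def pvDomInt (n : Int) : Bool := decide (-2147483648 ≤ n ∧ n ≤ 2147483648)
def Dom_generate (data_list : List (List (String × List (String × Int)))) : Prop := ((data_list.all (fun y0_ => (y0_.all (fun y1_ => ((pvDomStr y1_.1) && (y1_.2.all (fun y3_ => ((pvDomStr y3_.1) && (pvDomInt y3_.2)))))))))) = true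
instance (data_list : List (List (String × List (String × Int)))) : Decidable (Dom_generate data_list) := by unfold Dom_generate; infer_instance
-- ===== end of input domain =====

-- B builds no accumulator table at all: it flattens the (handler, counts) pairs, takes the
-- column totals in one pass, then sorts the pairs by handler and emits each report row from
-- one contiguous run of the sorted list (sort-then-scan group-by; objective: alternative).

-- shared context: the module constant LOG_LEVELS and Python's f"{x:<w}" / ljust padding
def pyLogLevels : List String := ["DEBUG", "INFO", "WARNING", "ERROR", "CRITICAL"]

def pyLjust (cs : List Char) (w : Nat) : List Char := cs ++ List.replicate (w - cs.length) ' '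

-- level_counts.get(level, 0): first-match lookup on the assoc-list dict
def lcGet (lc : List (String × Int)) (l : String) : Int := (PySem.Dict.mk lc).getD l 0

-- ===== PORT A =====
-- the body of A's 'for handler, level_counts in data.items()' loop
def generateStepA (st : PySem.Dict String (PySem.Dict String Int) × Int)
    (p : String × List (String × Int)) : PySem.Dict String (PySem.Dict String Int) × Int :=
  pyLogLevels.foldl (fun st l =>
    let v := lcGet p.2 l
    (st.1.modify p.1 PySem.Dict.empty (fun inn => inn.modify l 0 (· + v)), st.2 + v)) st

def generate (data_list : List (List (String × List (String × Int)))) : String :=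
  let st := data_list.foldl (fun st data => data.foldl generateStepA st) (PySem.Dict.empty, 0)
  let cmb := st.1
  let line0 := '\n' :: "Total requests: ".toList ++ PySem.Int.toChars st.2 ++ ['\n']
  let header := pyLjust "HANDLER".toList 24 ++ (pyLogLevels.map (fun l => pyLjust l.toList 8)).flatten
  let rows := (PySem.List.sorted cmb.keys (fun x => x) false).map (fun h =>
    pyLogLevels.foldl (fun r l =>
        r ++ pyLjust (PySem.Int.toChars ((cmb.getD h PySem.Dict.empty).getD l 0)) 8)
      (pyLjust h.toList 24))
  let footer := pyLogLevels.foldl (fun r l =>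
      r ++ pyLjust (PySem.Int.toChars
        ((cmb.keys.map (fun h => (cmb.getD h PySem.Dict.empty).getD l 0)).sum)) 8)
    (List.replicate 24 ' ')
  String.ofList (PySem.Chars.join ['\n'] ([line0, header] ++ rows ++ [footer]))

-- ===== PORT B =====
-- col(level): sum of level_counts.get(level, 0) over ALL flattened pairs (B's totals pass)
def colB (pairs : List (String × List (String × Int))) (l : String) : Int :=
  (pairs.map (fun p => lcGet p.2 l)).sum

-- one report row from a contiguous run of level_counts dicts sharing one handler
def runRow (h : String) (run : List (List (String × Int))) : List Char :=
  pyLjust h.toList 24 ++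
    (pyLogLevels.map (fun l =>
      pyLjust (PySem.Int.toChars ((run.map (fun lc => lcGet lc l)).sum)) 8)).flatten

-- B's while-loop over the sorted pair list: peel one maximal run per iteration
def rowsOf : List (String × List (String × Int)) → List (List Char)
  | [] => []
  | p :: rest =>
      runRow p.1 (p.2 :: (rest.takeWhile (fun q => q.1 == p.1)).map Prod.snd)
        :: rowsOf (rest.dropWhile (fun q => q.1 == p.1))
termination_by l => l.length
decreasing_by simpa using Nat.lt_succ_of_le (List.length_dropWhile_le _ _)

def generate_alt (data_list : List (List (String × List (String × Int)))) : String :=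
  let flat := data_list.flatMap (fun data => data)
  let totals := pyLogLevels.map (fun l => colB flat l)
  let total := totals.sum
  let pairs := PySem.List.sorted flat (fun p => p.1) false
  let line0 := '\n' :: "Total requests: ".toList ++ PySem.Int.toChars total ++ ['\n']
  let header := pyLjust "HANDLER".toList 24 ++ (pyLogLevels.map (fun l => pyLjust l.toList 8)).flatten
  let rows := rowsOf pairs
  let footer := List.replicate 24 ' ' ++ (totals.map (fun t => pyLjust (PySem.Int.toChars t) 8)).flatten
  String.ofList (PySem.Chars.join ['\n'] ([line0, header] ++ rows ++ [footer]))

-- ===== PRECONDITION & SPEC =====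
def Spec_generate (data_list : List (List (String × List (String × Int)))) (out : String) : Prop := out = generate_alt data_list
instance (data_list : List (List (String × List (String × Int)))) (out : String) : Decidable (Spec_generate data_list out) := by unfold Spec_generate; infer_instance

-- ===== CLAIM (what is proved, stated in full; the proofs are below) =====
def Claim_equal_generate : Prop := ∀ (data_list : List (List (String × List (String × Int)))), Dom_generate data_list → Spec_generate data_list (generate data_list)

-- ===== LEMMAS AND PROOFS =====

-- cell(h, l): sum of level_counts.get(l, 0) over the pairs whose handler is h (proof-side view)
def cellB (pairs : List (String × List (String × Int))) (h l : String) : Int :=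
  ((pairs.filter (fun p => p.1 == h)).map (fun p => lcGet p.2 l)).sum


-- one inner-loop pass of A at handler p.1, the five levels unrolled
lemma stepA_eval (st : PySem.Dict String (PySem.Dict String Int) × Int)
    (p : String × List (String × Int)) :
    generateStepA st p =
      (((((st.1.modify p.1 PySem.Dict.empty (fun inn => inn.modify "DEBUG" 0 (· + lcGet p.2 "DEBUG"))).modify
            p.1 PySem.Dict.empty (fun inn => inn.modify "INFO" 0 (· + lcGet p.2 "INFO"))).modify
            p.1 PySem.Dict.empty (fun inn => inn.modify "WARNING" 0 (· + lcGet p.2 "WARNING"))).modify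
            p.1 PySem.Dict.empty (fun inn => inn.modify "ERROR" 0 (· + lcGet p.2 "ERROR"))).modify
            p.1 PySem.Dict.empty (fun inn => inn.modify "CRITICAL" 0 (· + lcGet p.2 "CRITICAL")),
       st.2 + lcGet p.2 "DEBUG" + lcGet p.2 "INFO" + lcGet p.2 "WARNING" + lcGet p.2 "ERROR"
            + lcGet p.2 "CRITICAL") := by
  simp [generateStepA, pyLogLevels]

lemma stepA_getD_out (st : PySem.Dict String (PySem.Dict String Int) × Int)
    (p : String × List (String × Int)) (l : String) (hl : l ∈ pyLogLevels) (h' : String) :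
    ((generateStepA st p).1.getD h' PySem.Dict.empty).getD l 0
      = (st.1.getD h' PySem.Dict.empty).getD l 0 + (if p.1 = h' then lcGet p.2 l else 0) := by
  rw [stepA_eval]
  by_cases hh : h' = p.1
  · subst hh; fin_cases hl <;> simp [PySem.Dict.getD_modify]
  · have : ¬ p.1 = h' := fun e => hh e.symm
    simp [PySem.Dict.getD_modify, hh, this]

lemma stepA_keys (st : PySem.Dict String (PySem.Dict String Int) × Int)
    (p : String × List (String × Int)) :
    (generateStepA st p).1.keys
      = if st.1.contains p.1 then st.1.keys else st.1.keys ++ [p.1] := by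
  rw [stepA_eval]
  by_cases hc : st.1.contains p.1 = true
  · simp [PySem.Dict.keys_modify, hc, PySem.Dict.keys_insert_of_contains,
      PySem.Dict.contains_modify]
  · simp only [Bool.not_eq_true] at hc
    simp [PySem.Dict.keys_modify, PySem.Dict.keys_insert_of_not_contains _ _ hc,
      PySem.Dict.keys_insert_of_contains, PySem.Dict.contains_modify, hc]

lemma stepA_total (st : PySem.Dict String (PySem.Dict String Int) × Int)
    (p : String × List (String × Int)) :
    (generateStepA st p).2 = st.2 + (pyLogLevels.map (fun l => lcGet p.2 l)).sum := by
  rw [stepA_eval]; simp [pyLogLevels]; ring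

-- the characterisation of A's accumulated state in terms of B's direct sums
def CharA (pairs : List (String × List (String × Int)))
    (st : PySem.Dict String (PySem.Dict String Int) × Int) : Prop :=
  st.1.keys = PySem.Set.ofList (pairs.map Prod.fst) ∧
  (∀ h l, l ∈ pyLogLevels → (st.1.getD h PySem.Dict.empty).getD l 0 = cellB pairs h l) ∧
  st.2 = (pairs.map (fun p => (pyLogLevels.map (fun l => lcGet p.2 l)).sum)).sum

lemma charA_fold (pairs : List (String × List (String × Int))) :
    CharA pairs (pairs.foldl generateStepA (PySem.Dict.empty, 0)) := by
  induction pairs using List.reverseRecOn with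
  | nil =>
    refine ⟨by simp [PySem.Dict.keys_empty, PySem.Set.ofList], ?_, by simp⟩
    intro h l _; simp [PySem.Dict.getD_empty, cellB]
  | append_singleton ps p ih =>
    obtain ⟨hkeys, hcell, htot⟩ := ih
    rw [List.foldl_append]
    refine ⟨?_, ?_, ?_⟩
    · rw [List.foldl_cons, List.foldl_nil, stepA_keys, hkeys]
      have hmemiff : ps.foldl generateStepA (PySem.Dict.empty, 0) |>.1.contains p.1
          = (PySem.Set.ofList (ps.map Prod.fst)).contains p.1 := by
        by_cases hm : p.1 ∈ PySem.Set.ofList (ps.map Prod.fst)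
        · rw [(PySem.Dict.contains_iff_mem_keys _ _).mpr (hkeys ▸ hm)]
          simp [PySem.Set.contains, hm]
        · have : ¬ ((ps.foldl generateStepA (PySem.Dict.empty, 0)).1.contains p.1 = true) := by
            intro hc
            exact hm (hkeys ▸ (PySem.Dict.contains_iff_mem_keys _ _).mp hc)
          simp only [Bool.not_eq_true] at this
          rw [this]
          simp [PySem.Set.contains, hm]
      rw [hmemiff]
      simp only [List.map_append, List.map_cons, List.map_nil]
      rw [show PySem.Set.ofList (ps.map Prod.fst ++ [p.1])
            = PySem.Set.add (PySem.Set.ofList (ps.map Prod.fst)) p.1 by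
        simp [PySem.Set.ofList, List.foldl_append]]
      simp [PySem.Set.add, PySem.Set.contains]
    · intro h l hl
      rw [List.foldl_cons, List.foldl_nil, stepA_getD_out _ _ l hl, hcell h l hl]
      simp only [cellB, List.filter_append, List.map_append, List.sum_append]
      by_cases hph : p.1 = h
      · simp [hph]
      · simp [hph]
    · rw [List.foldl_cons, List.foldl_nil, stepA_total, htot]
      simp

-- double-sum swap: A sums per pair over the levels, B sums per level over the pairs
lemma sum_swap (ps : List (String × List (String × Int))) (ls : List String) :
    (ps.map (fun p => (ls.map (fun l => lcGet p.2 l)).sum)).sum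
      = (ls.map (fun l => (ps.map (fun p => lcGet p.2 l)).sum)).sum := by
  induction ps with
  | nil => simp
  | cons p ps ih =>
    simp only [List.map_cons, List.sum_cons, ih]
    rw [← PySem.List.sum_map_add_int]

-- footer cover: summing the per-handler cells over the nodup cover of all handlers is the column sum
lemma sum_cells_cover (K : List String) (ps : List (String × List (String × Int)))
    (hnd : K.Nodup) (hcov : ∀ p ∈ ps, p.1 ∈ K) (l : String) :
    (K.map (fun h => cellB ps h l)).sum = colB ps l := by
  induction K generalizing ps with
  | nil =>
    have : ps = [] := by
      cases ps with
      | nil => rfl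
      | cons q qs => exact absurd (hcov q (List.mem_cons_self)) (by simp)
    simp [this, colB]
  | cons h K ih =>
    rcases List.nodup_cons.mp hnd with ⟨hhK, hndK⟩
    have hsplit : colB ps l = cellB ps h l + colB (ps.filter (fun p => ¬ (p.1 = h))) l := by
      simp only [colB, cellB]
      rw [← List.sum_append, ← List.map_append]
      refine (List.Perm.sum_eq (List.Perm.map _ ?_)).symm
      have := (List.filter_append_perm (fun p => p.1 == h) ps)
      simpa using this
    rw [List.map_cons, List.sum_cons, hsplit]
    congr 1
    have hcell_eq : ∀ h' ∈ K, cellB ps h' l = cellB (ps.filter (fun p => ¬ (p.1 = h))) h' l := by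
      intro h' hh'
      have hne : h' ≠ h := fun e => hhK (e ▸ hh')
      simp only [cellB, List.filter_filter]
      congr 2
      apply List.filter_congr
      intro p _
      by_cases hp : p.1 = h'
      · simp [hp, hne]
      · simp [hp]
    rw [List.map_congr_left hcell_eq]
    refine ih _ hndK ?_
    intro p hp
    have hp' := List.of_mem_filter hp
    have : p.1 ∈ h :: K := hcov p (List.mem_of_mem_filter hp)
    rcases List.mem_cons.mp this with e | hm
    · exact absurd e (by simpa using hp')
    · exact hm

-- the abstract row for handler h read directly off the full pair list
def hRow (pairs : List (String × List (String × Int))) (h : String) : List Char :=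
  pyLjust h.toList 24 ++
    (pyLogLevels.map (fun l => pyLjust (PySem.Int.toChars (cellB pairs h l)) 8)).flatten

-- a list whose keys all equal h survives the key filter; one with no key h' is filtered away
lemma filter_key_eq (t : List (String × List (String × Int))) (h : String)
    (ht : ∀ q ∈ t, q.1 = h) : t.filter (fun q => q.1 == h) = t := by
  rw [List.filter_eq_self]; intro q hq; simpa using ht q hq

lemma filter_key_none (d : List (String × List (String × Int))) (h' : String)
    (hd : ∀ q ∈ d, q.1 ≠ h') : d.filter (fun q => q.1 == h') = [] := by
  rw [List.filter_eq_nil_iff]; intro q hq; simpa using hd q hq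

-- B's run scan over a key-sorted pair list produces exactly the sorted-handler rows
lemma rowsOf_sorted : ∀ ps : List (String × List (String × Int)),
    ps.Pairwise (fun a b => a.1 ≤ b.1) →
    rowsOf ps = (PySem.List.sorted (PySem.Set.ofList (ps.map Prod.fst)) (fun x => x) false).map
      (fun h => hRow ps h)
  | [], _ => by
    rw [rowsOf]
    simp [PySem.Set.ofList, PySem.List.sorted]
  | (h, lc) :: rest, hs => by
    obtain ⟨hhead, hrest⟩ := List.pairwise_cons.mp hs
    have htd : rest.takeWhile (fun q => q.1 == h) ++ rest.dropWhile (fun q => q.1 == h) = rest :=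
      List.takeWhile_append_dropWhile
    have ht : ∀ q ∈ rest.takeWhile (fun q => q.1 == h), q.1 = h := fun q hq => by
      simpa using List.mem_takeWhile_imp hq
    have hd_sub : (rest.dropWhile (fun q => q.1 == h)).Sublist rest := List.dropWhile_sublist _
    have hd_pair : (rest.dropWhile (fun q => q.1 == h)).Pairwise (fun a b => a.1 ≤ b.1) :=
      hrest.sublist hd_sub
    have hgt : ∀ q ∈ rest.dropWhile (fun q => q.1 == h), h < q.1 := by
      intro q hq
      have hle : h ≤ q.1 := hhead q (hd_sub.mem hq)
      refine lt_of_le_of_ne hle (fun e => ?_)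
      cases hDe : rest.dropWhile (fun q => q.1 == h) with
      | nil => rw [hDe] at hq; cases hq
      | cons d0 d' =>
        have hne0 : (d0.1 == h) = false := by
          have hnn : rest.dropWhile (fun q => q.1 == h) ≠ [] := by rw [hDe]; simp
          have := List.head_dropWhile_not (fun q : String × List (String × Int) => q.1 == h) hnn
          rwa [show (rest.dropWhile (fun q => q.1 == h)).head hnn = d0 from by simp [hDe]] at this
        have hd0 : d0.1 ≠ h := by simpa using hne0
        rw [hDe] at hq
        rcases List.mem_cons.mp hq with rfl | hq'
        · exact hd0 e.symm
        · have h1 : d0.1 ≤ q.1 := by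
            have := (List.pairwise_cons.mp (hDe ▸ hd_pair)).1
            exact this q hq'
          have h2 : h ≤ d0.1 := hhead d0 (hd_sub.mem (hDe ▸ List.mem_cons_self))
          exact hd0 (le_antisymm (e ▸ h1) h2)
    have hmem_tail : ∀ x, x ∈ PySem.List.sorted
          (PySem.Set.ofList ((rest.dropWhile (fun q => q.1 == h)).map Prod.fst)) (fun x => x) false
        ↔ x ∈ (rest.dropWhile (fun q => q.1 == h)).map Prod.fst := by
      intro x
      rw [PySem.List.mem_sorted, PySem.Set.mem_ofList]
    have hmem : ∀ x, x ∈ PySem.Set.ofList (((h, lc) :: rest).map Prod.fst)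
        ↔ x = h ∨ x ∈ (rest.dropWhile (fun q => q.1 == h)).map Prod.fst := by
      intro x
      rw [PySem.Set.mem_ofList]
      simp only [List.map_cons, List.mem_cons]
      constructor
      · rintro (rfl | hx)
        · exact Or.inl rfl
        · rw [← htd, List.map_append, List.mem_append] at hx
          rcases hx with hx | hx
          · obtain ⟨q, hq, rfl⟩ := List.mem_map.mp hx
            exact Or.inl (ht q hq)
          · exact Or.inr hx
      · rintro (rfl | hx)
        · exact Or.inl rfl
        · right
          rw [← htd, List.map_append, List.mem_append]
          exact Or.inr hx
    have hStail_nodup : (PySem.List.sorted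
        (PySem.Set.ofList ((rest.dropWhile (fun q => q.1 == h)).map Prod.fst)) (fun x => x) false).Nodup :=
      ((PySem.List.sorted_perm _ _ _).nodup_iff).mpr (PySem.Set.nodup_ofList _)
    have hnotin : h ∉ (rest.dropWhile (fun q => q.1 == h)).map Prod.fst := by
      intro hx
      obtain ⟨q, hq, e⟩ := List.mem_map.mp hx
      exact absurd e (ne_of_gt (hgt q hq))
    have hS : PySem.List.sorted (PySem.Set.ofList (((h, lc) :: rest).map Prod.fst)) (fun x => x) false
        = h :: PySem.List.sorted
            (PySem.Set.ofList ((rest.dropWhile (fun q => q.1 == h)).map Prod.fst)) (fun x => x) false := by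
      apply PySem.List.sorted_eq_of_perm_of_pairwise_lt
      · refine (List.perm_ext_iff_of_nodup ?_ (PySem.Set.nodup_ofList _)).mpr ?_
        · exact List.nodup_cons.mpr ⟨fun hx => hnotin ((hmem_tail h).mp hx), hStail_nodup⟩
        · intro x
          rw [List.mem_cons, hmem_tail x, hmem x]
      · refine List.pairwise_cons.mpr ⟨?_, PySem.List.sorted_ofList_pairwise_lt _⟩
        intro y hy
        obtain ⟨q, hq, rfl⟩ := List.mem_map.mp ((hmem_tail y).mp hy)
        exact hgt q hq
    have hfilter_ps : ∀ h' : String, h' ≠ h →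
        ((h, lc) :: rest).filter (fun q => q.1 == h')
          = (rest.dropWhile (fun q => q.1 == h)).filter (fun q => q.1 == h') := by
      intro h' hne
      rw [List.filter_cons]
      have hfalse : ((h, lc).1 == h') = false := by
        simp only [beq_eq_false_iff_ne, ne_eq]
        exact fun e => hne e.symm
      rw [hfalse, ← htd, List.filter_append,
        filter_key_none _ h' (fun q hq => by rw [ht q hq]; exact fun e => hne e.symm)]
      simp
    have hfilter_h : ((h, lc) :: rest).filter (fun q => q.1 == h)
        = (h, lc) :: rest.takeWhile (fun q => q.1 == h) := by
      rw [List.filter_cons]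
      simp only [beq_self_eq_true, if_true]
      rw [← htd, List.filter_append, filter_key_eq _ h ht,
        filter_key_none _ h (fun q hq => ne_of_gt (hgt q hq))]
      simp
    have hhead_row : runRow h (lc :: (rest.takeWhile (fun q => q.1 == h)).map Prod.snd)
        = hRow ((h, lc) :: rest) h := by
      unfold runRow hRow
      congr 2
      refine List.map_congr_left (fun l _ => ?_)
      have hc : cellB ((h, lc) :: rest) h l
          = ((lc :: (rest.takeWhile (fun q => q.1 == h)).map Prod.snd).map (fun lc => lcGet lc l)).sum := by
        unfold cellB
        rw [hfilter_h]
        simp [List.map_map, Function.comp_def]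
      rw [hc]
    have htail : rowsOf (rest.dropWhile (fun q => q.1 == h))
        = (PySem.List.sorted
            (PySem.Set.ofList ((rest.dropWhile (fun q => q.1 == h)).map Prod.fst)) (fun x => x) false).map
          (fun h' => hRow ((h, lc) :: rest) h') := by
      rw [rowsOf_sorted _ hd_pair]
      refine List.map_congr_left (fun h' hy => ?_)
      have hne : h' ≠ h := by
        obtain ⟨q, hq, rfl⟩ := List.mem_map.mp ((hmem_tail h').mp hy)
        exact ne_of_gt (hgt q hq)
      unfold hRow
      congr 2
      refine List.map_congr_left (fun l _ => ?_)
      have hc : cellB ((h, lc) :: rest) h' l = cellB (rest.dropWhile (fun q => q.1 == h)) h' l := by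
        unfold cellB
        rw [hfilter_ps h' hne]
      rw [hc]
    rw [rowsOf, hS, List.map_cons, hhead_row, htail]
termination_by ps => ps.length
decreasing_by simpa using Nat.lt_succ_of_le (List.length_dropWhile_le _ _)

-- ===== VERDICT (by name: the statement is the Claim_ definition above) =====
theorem generate_spec : Claim_equal_generate := by
  intro data_list _
  unfold Spec_generate generate generate_alt
  have hfold : data_list.foldl (fun st data => data.foldl generateStepA st) (PySem.Dict.empty, 0)
      = (data_list.flatMap (fun data => data)).foldl generateStepA (PySem.Dict.empty, 0) := by
    simp [List.flatMap_def, List.foldl_flatten]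
  set pairs := data_list.flatMap (fun data => data) with hpairs
  rw [hfold]
  obtain ⟨hkeys, hcell, htot⟩ := charA_fold pairs
  have hnodup : (PySem.Set.ofList (pairs.map Prod.fst)).Nodup := PySem.Set.nodup_ofList _
  have hcov : ∀ p ∈ pairs, p.1 ∈ PySem.Set.ofList (pairs.map Prod.fst) := by
    intro p hp
    rw [PySem.Set.mem_ofList]
    exact List.mem_map_of_mem hp
  have hrowA : ∀ h : String,
      pyLogLevels.foldl (fun r l =>
          r ++ pyLjust (PySem.Int.toChars
            (((pairs.foldl generateStepA (PySem.Dict.empty, 0)).1.getD h PySem.Dict.empty).getD l 0)) 8)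
        (pyLjust h.toList 24)
      = hRow pairs h := by
    intro h
    rw [PySem.List.foldl_append_eq_flatMap, List.flatMap_def]
    exact congrArg _ (congrArg _ (List.map_congr_left (fun l hl => by rw [hcell h l hl])))
  have hsortedpairs := PySem.List.sorted_perm pairs (fun p : String × List (String × Int) => p.1) false
  have hrowsB : rowsOf (PySem.List.sorted pairs (fun p => p.1) false)
      = (PySem.List.sorted (PySem.Set.ofList (pairs.map Prod.fst)) (fun x => x) false).map
          (fun h => hRow pairs h) := by
    rw [rowsOf_sorted _ (PySem.List.sorted_pairwise pairs (fun p => p.1))]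
    have hsetperm : (PySem.Set.ofList ((PySem.List.sorted pairs (fun p : String × List (String × Int) => p.1) false).map Prod.fst)).Perm
        (PySem.Set.ofList (pairs.map Prod.fst)) := by
      rw [List.perm_ext_iff_of_nodup (PySem.Set.nodup_ofList _) (PySem.Set.nodup_ofList _)]
      intro x
      rw [PySem.Set.mem_ofList, PySem.Set.mem_ofList]
      exact ⟨fun hx => (hsortedpairs.map Prod.fst).mem_iff.mp hx,
             fun hx => (hsortedpairs.map Prod.fst).mem_iff.mpr hx⟩
    rw [PySem.List.sorted_eq_sorted_of_perm _ _ _ (fun a b e => e) hsetperm]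
    refine List.map_congr_left (fun h _ => ?_)
    unfold hRow
    congr 2
    refine List.map_congr_left (fun l _ => ?_)
    unfold cellB
    congr 2
    exact ((hsortedpairs.filter _).map _).sum_eq
  apply congrArg String.ofList
  apply congrArg (PySem.Chars.join ['\n'])
  congr 1
  · congr 1
    · rw [htot, sum_swap]
      rfl
    · rw [hkeys, hrowsB]
      exact List.map_congr_left (fun h _ => hrowA h)
  · congr 1
    rw [PySem.List.foldl_append_eq_flatMap, List.flatMap_def, List.map_map]
    refine congrArg _ (congrArg List.flatten (List.map_congr_left (fun l hl => ?_)))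
    rw [hkeys, List.map_congr_left (fun h _ => hcell h l hl),
      sum_cells_cover _ _ hnodup hcov l]
    rfl
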